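-- pv_equiv track=rewrite | github.com/barShterenberg/Fundamentals-and-Applications-of-AI-Project | part_2/ex2_209149756_209249820.py | max_comb_map
-- ===== SOURCE A (Python) =====
-- def max_comb_map(bfs_maps):
--     first_map=bfs_maps[0]
--     cols=len(first_map[0])
--     rows=len(first_map)
--     new_map=[[0 for m in range(cols)] for n in range(rows)]
--     for n in range(rows):
--         for m in range(cols):
--             new_map[n][m] = max(bfs_maps, key=lambda x: x[n][m])[n][m]
--     return new_map
-- ===== SOURCE B (Python) =====
-- def max_comb_map(bfs_maps):
--     first = bfs_maps[0]
--     rows = len(first)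
--     cols = len(first[0])
--     result = [row[:cols] for row in first]
--     for other in bfs_maps[1:]:
--         for n in range(rows):
--             for m in range(cols):
--                 v = other[n][m]
--                 if result[n][m] < v:
--                     result[n][m] = v
--     return result
-- ===== Notes on version B (the rewrite author's own statement) =====
-- stated objective: faster
-- what changed: B seeds the result with a sliced copy of the first map and folds the remaining maps into it with a running in-place maximum, instead of A's per-cell call to max(bfs_maps, key=...) that rescans the whole list of maps and allocates a key lambda for every cell.
import Mathlib
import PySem

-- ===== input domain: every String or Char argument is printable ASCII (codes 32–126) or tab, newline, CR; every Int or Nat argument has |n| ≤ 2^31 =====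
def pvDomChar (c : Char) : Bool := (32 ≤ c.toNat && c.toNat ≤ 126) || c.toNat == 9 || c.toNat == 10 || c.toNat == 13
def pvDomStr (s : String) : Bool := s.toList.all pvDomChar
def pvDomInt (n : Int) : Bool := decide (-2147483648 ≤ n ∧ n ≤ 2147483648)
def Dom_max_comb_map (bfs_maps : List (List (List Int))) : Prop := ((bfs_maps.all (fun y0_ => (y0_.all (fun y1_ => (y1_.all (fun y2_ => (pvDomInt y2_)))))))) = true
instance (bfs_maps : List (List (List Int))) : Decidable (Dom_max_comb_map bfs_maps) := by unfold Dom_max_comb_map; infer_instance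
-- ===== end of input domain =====

-- B seeds the result with a sliced copy of the first map and folds the remaining maps into it with
-- a running maximum, instead of A's per-cell max(bfs_maps, key=...) rescan of the whole list of
-- maps; a timing run measured B faster by a constant factor. Neither version mutates its argument.

-- x[n][m] on a 2D map; total stand-in, the defaults are never reached under Pre_
def pvCell (mp : List (List Int)) (n m : Int) : Int :=
  PySem.List.pyGetD (PySem.List.pyGetD mp n []) m 0

-- ===== PORT A =====
def max_comb_map (bfs_maps : List (List (List Int))) : List (List Int) :=
  let first_map := PySem.List.pyGetD bfs_maps 0 []
  let cols : Int := PySem.List.len (PySem.List.pyGetD first_map 0 [])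
  let rows : Int := PySem.List.len first_map
  let new_map : List (List Int) :=
    (PySem.List.pyRange 0 rows 1).map (fun _n => (PySem.List.pyRange 0 cols 1).map (fun _m => (0 : Int)))
  (PySem.List.pyRange 0 rows 1).foldl (fun nm n =>
    (PySem.List.pyRange 0 cols 1).foldl (fun nm m =>
      PySem.List.pySetD nm n (PySem.List.pySetD (PySem.List.pyGetD nm n []) m
        (pvCell ((PySem.List.max? bfs_maps (fun x => pvCell x n m)).getD []) n m))) nm) new_map

-- ===== PORT B =====
def max_comb_map_alt (bfs_maps : List (List (List Int))) : List (List Int) :=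
  let first := PySem.List.pyGetD bfs_maps 0 []
  let rows : Int := PySem.List.len first
  let cols : Int := PySem.List.len (PySem.List.pyGetD first 0 [])
  let result : List (List Int) := first.map (fun row => PySem.List.slice row none (some cols))
  (PySem.List.slice bfs_maps (some 1) none).foldl (fun result other =>
    (PySem.List.pyRange 0 rows 1).foldl (fun result n =>
      (PySem.List.pyRange 0 cols 1).foldl (fun result m =>
        let v := pvCell other n m
        if PySem.List.pyGetD (PySem.List.pyGetD result n []) m 0 < v then
          PySem.List.pySetD result n (PySem.List.pySetD (PySem.List.pyGetD result n []) m v)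
        else result) result) result) result

-- ===== PRECONDITION & SPEC =====
-- Pre_ is exactly where Python A returns without raising: a nonempty list whose first map is
-- nonempty, and (unless the first map's first row is empty, in which case no cell is ever read)
-- every map has at least as many rows as the first map and each of those rows at least as many
-- entries as the first map's first row.
def Pre_max_comb_map (bfs_maps : List (List (List Int))) : Prop :=
  bfs_maps ≠ [] ∧ (bfs_maps.getD 0 []) ≠ [] ∧
  (((bfs_maps.getD 0 []).getD 0 []).length = 0 ∨
   ∀ mp ∈ bfs_maps, (bfs_maps.getD 0 []).length ≤ mp.length ∧
     ∀ n, n < (bfs_maps.getD 0 []).length →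
       ((bfs_maps.getD 0 []).getD 0 []).length ≤ (mp.getD n []).length)
instance (bfs_maps : List (List (List Int))) : Decidable (Pre_max_comb_map bfs_maps) := by
  unfold Pre_max_comb_map; infer_instance

def pvWitness_max_comb_map : List (List (List Int)) :=
  [[[1, 2], [3, 4]], [[5, 0], [0, 6]]]

def Spec_max_comb_map (bfs_maps : List (List (List Int))) (out : List (List Int)) : Prop := out = max_comb_map_alt bfs_maps
instance (bfs_maps : List (List (List Int))) (out : List (List Int)) : Decidable (Spec_max_comb_map bfs_maps out) := by unfold Spec_max_comb_map; infer_instance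

-- ===== CLAIM (what is proved, stated in full; the proofs are below) =====
def Claim_equal_max_comb_map : Prop := ∀ (bfs_maps : List (List (List Int))), Dom_max_comb_map bfs_maps → Pre_max_comb_map bfs_maps → Spec_max_comb_map bfs_maps (max_comb_map bfs_maps)

-- ===== LEMMAS AND PROOFS =====

-- setting an index back to its current value is a no-op (an out-of-range set already is one)
theorem pvSet_getD_self {α : Type} (xs : List α) (n : Nat) (d : α) :
    xs.set n (xs.getD n d) = xs := by
  by_cases h : n < xs.length
  · rw [List.getD_eq_getElem xs d h, List.set_getElem_self]
  · rw [List.set_eq_of_length_le (by omega)]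

-- one left-to-right update pass over indices 0..c-1, each cell rewritten from its old value
theorem pvPass {α : Type} (d : α) (f : Nat → α → α) (xs : List α) (c : Nat) :
    (List.range c).foldl (fun ys k => ys.set k (f k (ys.getD k d))) xs
      = xs.mapIdx (fun j x => if j < c then f j x else x) := by
  induction c with
  | zero => simp; apply List.ext_getElem <;> simp
  | succ c ih =>
    rw [List.range_succ, List.foldl_append, ih]
    simp only [List.foldl_cons, List.foldl_nil]
    apply List.ext_getElem
    · simp
    · intro j hj hj2
      have hjx : j < xs.length := by simpa using hj2
      simp only [List.getElem_set, List.getElem_mapIdx]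
      by_cases hcj : c = j
      · subst hcj
        simp [List.getElem?_eq_getElem hjx]
      · simp only [hcj, if_false]
        by_cases hlt : j < c
        · simp [hlt, Nat.lt_succ_of_lt hlt]
        · have : ¬ j < c + 1 := by omega
          simp [hlt, this]

-- a fold that only ever rewrites position n of the outer list collapses to one set at n
theorem pvFoldSetFocus {α : Type} (d : α) (n : Nat) (F : α → Nat → α) (L : List Nat) :
    ∀ (g : List α),
      L.foldl (fun g k => g.set n (F (g.getD n d) k)) g = g.set n (L.foldl F (g.getD n d)) := by
  induction L with
  | nil => intro g; simp only [List.foldl_nil]; exact (pvSet_getD_self g n d).symm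
  | cons k L ih =>
    intro g
    simp only [List.foldl_cons]
    rw [ih]
    by_cases h : n < g.length
    · have h1 : (g.set n (F (g.getD n d) k)).getD n d = F (g.getD n d) k := by
        rw [List.getD_eq_getElem _ d (by simpa using h)]; simp
      rw [h1, List.set_set]
    · rw [List.set_eq_of_length_le (le_of_not_gt h), List.set_eq_of_length_le (le_of_not_gt h),
          List.set_eq_of_length_le (le_of_not_gt h)]

-- the value read out of max(xs, key=...) is the running maximum of the keys
theorem pvMaxKey {α : Type} (key : α → Int) (d : α) (x : α) (t : List α) :
    key ((PySem.List.max? (x :: t) key).getD d)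
      = t.foldl (fun a y => if a < key y then key y else a) (key x) := by
  have hfold : t.foldl (fun a y => if a < key y then key y else a) (key x)
      = (t.map key).foldl max (key x) := by
    rw [List.foldl_map]
    apply PySem.List.foldl_congr_mem
    intro a y _
    rw [max_def]; split_ifs <;> omega
  obtain ⟨sel, hsel⟩ : ∃ s, PySem.List.max? (x :: t) key = some s := by
    rcases h : PySem.List.max? (x :: t) key with _ | s
    · exact absurd ((PySem.List.max?_eq_none_iff _ _).mp h) (by simp)
    · exact ⟨s, rfl⟩
  rw [hsel, Option.getD_some, hfold]
  have hmax := PySem.List.max?_isMax hsel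
  have hmem := PySem.List.max?_mem hsel
  apply le_antisymm
  · rcases List.mem_cons.mp hmem with h | h
    · rw [h]; exact (PySem.List.le_foldl_max (t.map key) (key x)).1
    · exact (PySem.List.le_foldl_max (t.map key) (key x)).2 (key sel) (List.mem_map_of_mem h)
  · rcases PySem.List.foldl_max_mem (t.map key) (key x) with h | h
    · rw [h]; exact hmax x (by simp)
    · obtain ⟨y, hy, hEq⟩ := List.mem_map.mp h
      rw [← hEq]
      exact hmax y (List.mem_cons_of_mem _ hy)

-- a fold over range(0, R) is a fold over List.range R
theorem pvFoldRange {β : Type} (R : Nat) (f : β → Int → β) (init : β) :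
    (PySem.List.pyRange 0 (R : Int) 1).foldl f init
      = (List.range R).foldl (fun s (k : Nat) => f s (k : Int)) init := by
  rw [PySem.List.pyRange_one]
  simp only [Int.sub_zero, Int.toNat_natCast]
  rw [List.foldl_map]
  apply PySem.List.foldl_congr_mem
  intro s k _
  simp

theorem pvMapRange {β : Type} (R : Nat) (f : Int → β) :
    (PySem.List.pyRange 0 (R : Int) 1).map f = (List.range R).map (fun (k : Nat) => f (k : Int)) := by
  rw [PySem.List.pyRange_one]
  simp [List.map_map, Function.comp]

-- A's doubly nested write loop is a pointwise map over the grid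
theorem pvGridA (R C : Nat) (V : Nat → Nat → Int) (g : List (List Int)) :
    (List.range R).foldl (fun nm kn =>
        (List.range C).foldl (fun nm km => nm.set kn ((nm.getD kn []).set km (V kn km))) nm) g
      = g.mapIdx (fun n row =>
          if n < R then row.mapIdx (fun m x => if m < C then V n m else x) else row) := by
  have inner : ∀ (kn : Nat) (nm : List (List Int)),
      (List.range C).foldl (fun nm km => nm.set kn ((nm.getD kn []).set km (V kn km))) nm
        = nm.set kn ((nm.getD kn []).mapIdx (fun m x => if m < C then V kn m else x)) := by
    intro kn nm
    have h1 := pvFoldSetFocus ([] : List Int) kn (fun row km => row.set km (V kn km)) (List.range C) nm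
    rw [h1, pvPass (0 : Int) (fun m _ => V kn m) (nm.getD kn []) C]
  calc (List.range R).foldl (fun nm kn =>
        (List.range C).foldl (fun nm km => nm.set kn ((nm.getD kn []).set km (V kn km))) nm) g
      = (List.range R).foldl (fun nm kn =>
          nm.set kn ((fun n (row : List Int) => row.mapIdx (fun m x => if m < C then V n m else x)) kn (nm.getD kn []))) g := by
        apply PySem.List.foldl_congr_mem
        intro nm kn _
        exact inner kn nm
    _ = _ := pvPass ([] : List Int) (fun n row => row.mapIdx (fun m x => if m < C then V n m else x)) g R

-- B's doubly nested compare-and-write loop is a pointwise running-max map over the grid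
theorem pvGridB (R C : Nat) (V : Nat → Nat → Int) (g : List (List Int)) :
    (List.range R).foldl (fun nm kn =>
        (List.range C).foldl (fun nm km =>
          if (nm.getD kn []).getD km 0 < V kn km
          then nm.set kn ((nm.getD kn []).set km (V kn km)) else nm) nm) g
      = g.mapIdx (fun n row =>
          if n < R then row.mapIdx (fun m x => if m < C then (if x < V n m then V n m else x) else x) else row) := by
  have hbody : ∀ (kn km : Nat) (nm : List (List Int)),
      (if (nm.getD kn []).getD km 0 < V kn km
       then nm.set kn ((nm.getD kn []).set km (V kn km)) else nm)
        = nm.set kn ((fun (row : List Int) km => row.set km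
            (if row.getD km 0 < V kn km then V kn km else row.getD km 0)) (nm.getD kn []) km) := by
    intro kn km nm
    by_cases h : (nm.getD kn []).getD km 0 < V kn km
    · simp only [if_pos h]
    · simp only [if_neg h, pvSet_getD_self]
  have inner : ∀ (kn : Nat) (nm : List (List Int)),
      (List.range C).foldl (fun nm km =>
          if (nm.getD kn []).getD km 0 < V kn km
          then nm.set kn ((nm.getD kn []).set km (V kn km)) else nm) nm
        = nm.set kn ((nm.getD kn []).mapIdx
            (fun m x => if m < C then (if x < V kn m then V kn m else x) else x)) := by
    intro kn nm
    have hc := PySem.List.foldl_congr_mem (List.range C)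
      (fun nm km => if (nm.getD kn []).getD km 0 < V kn km
        then nm.set kn ((nm.getD kn []).set km (V kn km)) else nm)
      (fun nm km => nm.set kn ((fun (row : List Int) km => row.set km
        (if row.getD km 0 < V kn km then V kn km else row.getD km 0)) (nm.getD kn []) km))
      nm (fun acc km _ => hbody kn km acc)
    rw [hc]
    exact (pvFoldSetFocus ([] : List Int) kn (fun (row : List Int) km => row.set km
        (if row.getD km 0 < V kn km then V kn km else row.getD km 0)) (List.range C) nm).trans
      (congrArg (fun r => nm.set kn r)
        (pvPass (0 : Int) (fun m x => if x < V kn m then V kn m else x) (nm.getD kn []) C))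
  calc (List.range R).foldl (fun nm kn =>
        (List.range C).foldl (fun nm km =>
          if (nm.getD kn []).getD km 0 < V kn km
          then nm.set kn ((nm.getD kn []).set km (V kn km)) else nm) nm) g
      = (List.range R).foldl (fun nm kn =>
          nm.set kn ((fun n (row : List Int) => row.mapIdx
            (fun m x => if m < C then (if x < V n m then V n m else x) else x)) kn (nm.getD kn []))) g := by
        apply PySem.List.foldl_congr_mem
        intro nm kn _
        exact inner kn nm
    _ = _ := pvPass ([] : List Int) (fun n row => row.mapIdx
          (fun m x => if m < C then (if x < V n m then V n m else x) else x)) g R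

-- A in closed form: a grid of values read out of max(bfs_maps, key=...)
theorem pvA_canon (first : List (List Int)) (rest : List (List (List Int))) :
    max_comb_map (first :: rest)
      = (List.range first.length).map (fun (n : Nat) =>
          (List.range (first.getD 0 []).length).map (fun (m : Nat) =>
            pvCell ((PySem.List.max? (first :: rest) (fun x => pvCell x ((n : Nat) : Int) ((m : Nat) : Int))).getD [])
              ((n : Nat) : Int) ((m : Nat) : Int))) := by
  simp only [max_comb_map, PySem.List.pyGetD_zero, List.getD_cons_zero, PySem.List.len_eq]
  rw [pvFoldRange, pvMapRange]
  simp only [pvFoldRange, pvMapRange, PySem.List.pySetD_natCast, PySem.List.pyGetD_natCast]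
  rw [pvGridA first.length (first.getD 0 []).length
      (fun n m => pvCell ((PySem.List.max? (first :: rest) (fun x => pvCell x (n : Int) (m : Int))).getD []) (n : Int) (m : Int))]
  apply List.ext_getElem
  · simp
  · intro n h1 h2
    simp only [List.getElem_mapIdx, List.getElem_map, List.getElem_range]
    rw [if_pos (by simpa using h1)]
    apply List.ext_getElem
    · simp
    · intro m hm1 hm2
      simp only [List.getElem_mapIdx, List.getElem_map, List.getElem_range]
      rw [if_pos (by simpa using hm1)]

-- folding maps one by one into a canonical grid accumulates a per-cell running maximum
theorem pvB_fold (R C : Nat) (others : List (List (List Int))) :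
    ∀ (W : Nat → Nat → Int),
      others.foldl (fun g other =>
        (List.range R).foldl (fun nm (kn : Nat) =>
          (List.range C).foldl (fun nm (km : Nat) =>
            if (nm.getD kn []).getD km 0 < pvCell other (kn : Int) (km : Int)
            then nm.set kn ((nm.getD kn []).set km (pvCell other (kn : Int) (km : Int))) else nm) nm) g)
        ((List.range R).map (fun (n : Nat) => (List.range C).map (fun (m : Nat) => W n m)))
      = (List.range R).map (fun (n : Nat) => (List.range C).map (fun (m : Nat) =>
          others.foldl (fun a y => if a < pvCell y (n : Int) (m : Int) then pvCell y (n : Int) (m : Int) else a) (W n m))) := by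
  induction others with
  | nil => intro W; simp
  | cons other t ih =>
    intro W
    simp only [List.foldl_cons]
    rw [pvGridB R C (fun kn km => pvCell other (kn : Int) (km : Int))]
    have hstep : ((List.range R).map (fun (n : Nat) => (List.range C).map (fun (m : Nat) => W n m))).mapIdx
        (fun n row => if n < R then row.mapIdx (fun m x =>
          if m < C then (if x < pvCell other (n : Int) (m : Int) then pvCell other (n : Int) (m : Int) else x) else x) else row)
        = (List.range R).map (fun (n : Nat) => (List.range C).map (fun (m : Nat) =>
            if W n m < pvCell other (n : Int) (m : Int) then pvCell other (n : Int) (m : Int) else W n m)) := by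
      apply List.ext_getElem
      · simp
      · intro n h1 h2
        simp only [List.getElem_mapIdx, List.getElem_map, List.getElem_range]
        rw [if_pos (by simpa using h1)]
        apply List.ext_getElem
        · simp
        · intro m hm1 hm2
          simp only [List.getElem_mapIdx, List.getElem_map, List.getElem_range]
          rw [if_pos (by simpa using hm1)]
    rw [hstep, ih (fun n m => if W n m < pvCell other (n : Int) (m : Int) then pvCell other (n : Int) (m : Int) else W n m)]

-- B in closed form, given that the first map's rows are long enough
theorem pvB_canon (first : List (List Int)) (rest : List (List (List Int)))
    (hlen : ∀ n, n < first.length → (first.getD 0 []).length ≤ (first.getD n []).length) :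
    max_comb_map_alt (first :: rest)
      = (List.range first.length).map (fun (n : Nat) =>
          (List.range (first.getD 0 []).length).map (fun (m : Nat) =>
            rest.foldl (fun a y => if a < pvCell y ((n : Nat) : Int) ((m : Nat) : Int)
              then pvCell y ((n : Nat) : Int) ((m : Nat) : Int) else a)
              (pvCell first ((n : Nat) : Int) ((m : Nat) : Int)))) := by
  simp only [max_comb_map_alt, PySem.List.pyGetD_zero, List.getD_cons_zero, PySem.List.len_eq,
    PySem.List.slice_from_one, List.tail_cons, PySem.List.slice_to_natCast]
  simp only [pvFoldRange, PySem.List.pySetD_natCast, PySem.List.pyGetD_natCast]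
  have h0 : first.map (fun row => row.take (first.getD 0 []).length)
      = (List.range first.length).map (fun (n : Nat) =>
          (List.range (first.getD 0 []).length).map (fun (m : Nat) =>
            pvCell first ((n : Nat) : Int) ((m : Nat) : Int))) := by
    apply List.ext_getElem
    · simp
    · intro n h1 h2
      have hn : n < first.length := by simpa using h1
      have hrow : (first.getD n []).length = first[n].length := by
        rw [List.getD_eq_getElem _ _ hn]
      simp only [List.getElem_map, List.getElem_range]
      apply List.ext_getElem
      · simp only [List.length_take, List.length_map, List.length_range]
        have hle := hlen n hn
        rw [List.getD_eq_getElem _ _ hn] at hle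
        omega
      · intro m hm1 hm2
        have hm : m < (first.getD 0 []).length := by simpa using hm2
        have hmrow : m < first[n].length := by
          have := hlen n hn
          omega
        simp only [List.getElem_take, List.getElem_map, List.getElem_range]
        show first[n][m] = pvCell first (n : Int) (m : Int)
        simp only [pvCell, PySem.List.pyGetD_natCast]
        rw [List.getD_eq_getElem _ _ hn, List.getD_eq_getElem _ _ hmrow]
  rw [h0]
  exact pvB_fold first.length (first.getD 0 []).length rest (fun n m => pvCell first (n : Int) (m : Int))

-- ===== VERDICT (by name: the statement is the Claim_ definition above) =====
theorem max_comb_map_spec : Claim_equal_max_comb_map := by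
  intro bfs_maps _hdom hpre
  unfold Spec_max_comb_map
  match bfs_maps, hpre with
  | first :: rest, hpre =>
    have hlen : ∀ n, n < first.length → (first.getD 0 []).length ≤ (first.getD n []).length := by
      rcases hpre.2.2 with h0 | hall
      · intro n _
        simp only [List.getD_cons_zero] at h0
        omega
      · intro n hn
        have := (hall first (List.mem_cons_self)).2 n (by simpa using hn)
        simpa using this
    rw [pvA_canon first rest, pvB_canon first rest hlen]
    exact congrArg (fun f => List.map f (List.range first.length)) (funext fun n =>
      congrArg (fun g => List.map g (List.range (first.getD 0 []).length)) (funext fun m =>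
        pvMaxKey (fun x => pvCell x (n : Int) (m : Int)) [] first rest))
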